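-- pv_equiv track=rewrite | github.com/MatejRojec/Uravnotezen-rdece-modri-povezan-podgraf | Matej_algo.py | sum_of_colors
-- ===== SOURCE A (Python) =====
-- def sum_of_colors(grid, pattern, col):
--     j = 0
--     for item in grid:
--         if item[0] == col:
--             for v in pattern:
--                 if item[1] == (v-1):
--                     j = j+item[2]
--     return j
-- ===== SOURCE B (Python) =====
-- def sum_of_colors(grid, pattern, col):
--     cnt = {}
--     for v in pattern:
--         cnt[v - 1] = cnt.get(v - 1, 0) + 1
--     total = 0
--     for item in grid:
--         if item[0] == col and item[1] in cnt:
--             total += item[2] * cnt[item[1]]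
--     return total
-- ===== Notes on version B (the rewrite author's own statement) =====
-- stated objective: alternative
-- what changed: replaces the inner scan of pattern per grid row by a count dictionary built once from pattern, so each row is handled with one lookup
-- outside the precondition, e.g. on sum_of_colors([(1,)], [], 1): A returns 0, B raises IndexError
import Mathlib
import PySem

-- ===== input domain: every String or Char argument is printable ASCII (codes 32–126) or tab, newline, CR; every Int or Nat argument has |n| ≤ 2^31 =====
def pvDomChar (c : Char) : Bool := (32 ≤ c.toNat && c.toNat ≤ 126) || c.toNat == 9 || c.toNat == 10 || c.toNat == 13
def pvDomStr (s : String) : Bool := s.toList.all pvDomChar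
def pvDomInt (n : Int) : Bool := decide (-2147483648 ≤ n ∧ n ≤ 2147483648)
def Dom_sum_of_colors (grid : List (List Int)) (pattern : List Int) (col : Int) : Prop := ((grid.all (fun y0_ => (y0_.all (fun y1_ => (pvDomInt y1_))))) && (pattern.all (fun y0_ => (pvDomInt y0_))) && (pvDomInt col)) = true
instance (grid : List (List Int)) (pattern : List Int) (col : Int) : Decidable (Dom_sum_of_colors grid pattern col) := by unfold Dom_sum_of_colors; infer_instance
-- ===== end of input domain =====

-- B builds a count dictionary from pattern once and does one lookup per matching grid row instead of rescanning pattern (objective: alternative).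


-- ===== PORT A =====
def sum_of_colors (grid : List (List Int)) (pattern : List Int) (col : Int) : Int :=
  grid.foldl (fun j item =>
    if (PySem.List.pyGet? item 0).getD 0 = col then
      pattern.foldl (fun j v =>
        if (PySem.List.pyGet? item 1).getD 0 = v - 1 then j + (PySem.List.pyGet? item 2).getD 0
        else j) j
    else j) 0

-- ===== PORT B =====
def sum_of_colors_alt (grid : List (List Int)) (pattern : List Int) (col : Int) : Int :=
  let cnt : PySem.Dict Int Int :=
    pattern.foldl (fun d v => d.insert (v - 1) (d.getD (v - 1) 0 + 1)) PySem.Dict.empty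
  grid.foldl (fun total item =>
    if (PySem.List.pyGet? item 0).getD 0 = col ∧
       cnt.contains ((PySem.List.pyGet? item 1).getD 0) then
      total + (PySem.List.pyGet? item 2).getD 0 * cnt.getD ((PySem.List.pyGet? item 1).getD 0) 0
    else total) 0

-- ===== PRECONDITION & SPEC =====
-- Pre_ excludes the rows on which the Python code indexes past the row's end and raises IndexError
-- (empty rows; rows matching col shorter than 2, or shorter than 3 when their second entry matches
-- the pattern); it also excludes single-element rows equal to col with an empty pattern, where A
-- returns 0 only because its inner loop never runs while B's single access pattern raises.
def pvRowOk (pattern : List Int) (col : Int) (item : List Int) : Bool :=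
  match item with
  | [] => false
  | [a] => a != col
  | [a, b] => a != col || !(pattern.contains (b + 1))
  | _ => true

def Pre_sum_of_colors (grid : List (List Int)) (pattern : List Int) (col : Int) : Prop :=
  grid.all (pvRowOk pattern col) = true
instance (grid : List (List Int)) (pattern : List Int) (col : Int) : Decidable (Pre_sum_of_colors grid pattern col) := by unfold Pre_sum_of_colors; infer_instance

def pvWitness_sum_of_colors : List (List Int) × List Int × Int := ([[1, 2, 5], [0, 1, 7], [1, 1, 3]], [2, 3, 2], 1)

def Spec_sum_of_colors (grid : List (List Int)) (pattern : List Int) (col : Int) (out : Int) : Prop := out = sum_of_colors_alt grid pattern col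
instance (grid : List (List Int)) (pattern : List Int) (col : Int) (out : Int) : Decidable (Spec_sum_of_colors grid pattern col out) := by unfold Spec_sum_of_colors; infer_instance

-- ===== CLAIM (what is proved, stated in full; the proofs are below) =====
def Claim_equal_sum_of_colors : Prop := ∀ (grid : List (List Int)) (pattern : List Int) (col : Int), Dom_sum_of_colors grid pattern col → Pre_sum_of_colors grid pattern col → Spec_sum_of_colors grid pattern col (sum_of_colors grid pattern col)

-- ===== LEMMAS AND PROOFS =====

-- A's inner loop over pattern adds c once per occurrence of b+1 in pattern.
theorem inner_loop_eq_count (pattern : List Int) (b c : Int) (j : Int) :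
    pattern.foldl (fun j v => if b = v - 1 then j + c else j) j
      = j + c * pattern.count (b + 1) := by
  induction pattern generalizing j with
  | nil => simp
  | cons v vs ih =>
    rw [List.foldl_cons]
    by_cases h : b = v - 1
    · have hv : v = b + 1 := by omega
      rw [if_pos h, ih, hv, List.count_cons_self]
      push_cast
      ring
    · have hv : (b + 1) ≠ v := by omega
      rw [if_neg h, ih]
      simp [List.count_cons]
      left
      omega

-- B's dictionary is the counter of pattern.map (· - 1).
theorem cnt_eq_counter (pattern : List Int) :
    pattern.foldl (fun d v => d.insert (v - 1) (d.getD (v - 1) 0 + 1)) PySem.Dict.empty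
      = PySem.Dict.counter (pattern.map (fun v => v - 1)) := by
  rw [← PySem.Dict.foldl_insert_getD_add_one_eq_counter, List.foldl_map]

theorem count_map_sub_one (pattern : List Int) (b : Int) :
    (pattern.map (fun v => v - 1)).count b = pattern.count (b + 1) := by
  induction pattern with
  | nil => simp
  | cons v vs ih =>
    simp only [List.map_cons, List.count_cons, ih]
    by_cases h : v = b + 1
    · have h' : v - 1 = b := by omega
      simp [h, h']
    · have h' : ¬ (v - 1 = b) := by omega
      simp [h, h']

theorem mem_map_sub_one (pattern : List Int) (b : Int) :
    b ∈ pattern.map (fun v => v - 1) ↔ (b + 1) ∈ pattern := by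
  constructor
  · rintro h
    obtain ⟨v, hv, he⟩ := List.mem_map.mp h
    have : v = b + 1 := by omega
    exact this ▸ hv
  · intro h
    exact List.mem_map.mpr ⟨b + 1, h, by ring⟩

theorem sum_of_colors_spec' (grid : List (List Int)) (pattern : List Int) (col : Int)
    (hpre : Pre_sum_of_colors grid pattern col) :
    sum_of_colors grid pattern col = sum_of_colors_alt grid pattern col := by
  unfold sum_of_colors sum_of_colors_alt
  rw [cnt_eq_counter]
  apply PySem.List.foldl_congr_mem
  intro j item _
  by_cases hc : (PySem.List.pyGet? item 0).getD 0 = col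
  · rw [if_pos hc, inner_loop_eq_count]
    by_cases hin : ((PySem.List.pyGet? item 1).getD 0 + 1) ∈ pattern
    · have hc2 : (PySem.Dict.counter (pattern.map (fun v => v - 1))).contains
          ((PySem.List.pyGet? item 1).getD 0) = true := by
        rw [PySem.Dict.contains_counter]
        exact List.contains_iff_mem.mpr ((mem_map_sub_one _ _).mpr hin)
      rw [if_pos ⟨hc, hc2⟩, PySem.Dict.getD_counter, count_map_sub_one]
    · have hzero : pattern.count ((PySem.List.pyGet? item 1).getD 0 + 1) = 0 :=
        List.count_eq_zero.mpr hin
      by_cases hc2 : (PySem.Dict.counter (pattern.map (fun v => v - 1))).contains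
          ((PySem.List.pyGet? item 1).getD 0) = true
      · rw [if_pos ⟨hc, hc2⟩, PySem.Dict.getD_counter, count_map_sub_one, hzero]
      · rw [if_neg (fun hand => hc2 hand.2), hzero]
        simp
  · rw [if_neg hc, if_neg (fun hand => hc hand.1)]

-- ===== VERDICT (by name: the statement is the Claim_ definition above) =====
theorem sum_of_colors_spec : Claim_equal_sum_of_colors := by
  intro grid pattern col _ hpre
  exact sum_of_colors_spec' grid pattern col hpre
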